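-- pv_equiv track=rewrite | github.com/abasmartinc/apiempresas | borme_flow/fill_radar_scores.py | get_location_score
-- ===== SOURCE A (Python) =====
-- def get_location_score(registry: str, municipality: str) -> int:
--     """Score based on economic relevance of the city/registry."""
--     text = (str(registry) + " " + str(municipality)).upper()
--     if "MADRID" in text or "BARCELONA" in text:
--         return 4
--     if any(x in text for x in ["VALENCIA", "ALICANTE", "MALAGA", "SEVILLA", "BIZKAIA"]):
--         return 3
--     important_provinces = ["MURCIA", "ZARAGOZA", "PONTEVEDRA", "ASTURIAS", "CORUÑA", "BALEARS", "PALMAS", "TENERIFE"]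
--     if any(x in text for x in important_provinces):
--         return 2
--     return 1
-- ===== SOURCE B (Python) =====
-- _TABLE = {
--     "MADRID": 4, "BARCELONA": 4,
--     "VALENCIA": 3, "ALICANTE": 3, "MALAGA": 3, "SEVILLA": 3, "BIZKAIA": 3,
--     "MURCIA": 2, "ZARAGOZA": 2, "PONTEVEDRA": 2, "ASTURIAS": 2, "CORUÑA": 2,
--     "BALEARS": 2, "PALMAS": 2, "TENERIFE": 2,
-- }
--
-- def get_location_score(registry: str, municipality: str) -> int:
--     """Score based on economic relevance of the city/registry."""
--     text = (str(registry) + " " + str(municipality)).upper()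
--     best = 1
--     for kw, score in _TABLE.items():
--         if kw in text and score > best:
--             best = score
--     return best
-- ===== Notes on version B (the rewrite author's own statement) =====
-- stated objective: simpler
-- what changed: Replaced the three-tier early-return cascade over hard-coded keyword lists with a single keyword-to-score table reduced in one pass (keep the best matching score, default 1), which is correct because a higher score always corresponds to an earlier tier.
import Mathlib
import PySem

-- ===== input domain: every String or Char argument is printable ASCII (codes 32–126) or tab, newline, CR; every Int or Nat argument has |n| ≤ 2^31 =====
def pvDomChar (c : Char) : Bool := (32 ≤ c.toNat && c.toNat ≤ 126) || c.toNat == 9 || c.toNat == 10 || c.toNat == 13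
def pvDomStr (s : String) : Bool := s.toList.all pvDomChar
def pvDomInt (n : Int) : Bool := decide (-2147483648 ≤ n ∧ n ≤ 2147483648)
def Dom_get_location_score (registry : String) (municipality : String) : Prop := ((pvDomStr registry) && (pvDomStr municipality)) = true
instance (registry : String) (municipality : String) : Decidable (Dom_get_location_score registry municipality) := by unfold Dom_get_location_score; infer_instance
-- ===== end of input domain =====

-- B replaces A's three-tier early-return cascade with one keyword→score table reduced
-- in a single best-score pass (objective: simpler); exact equivalence is proved below.


-- ===== PORT A =====
def get_location_score (registry : String) (municipality : String) : Int :=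
  let text := PySem.Str.upper (registry ++ " " ++ municipality)
  if PySem.Str.isIn "MADRID" text || PySem.Str.isIn "BARCELONA" text then 4
  else if ["VALENCIA", "ALICANTE", "MALAGA", "SEVILLA", "BIZKAIA"].any
      (fun x => PySem.Str.isIn x text) then 3
  else
    let important_provinces := ["MURCIA", "ZARAGOZA", "PONTEVEDRA", "ASTURIAS", "CORUÑA", "BALEARS", "PALMAS", "TENERIFE"]
    if important_provinces.any (fun x => PySem.Str.isIn x text) then 2
    else 1

-- ===== PORT B =====
def pvTable : PySem.Dict String Int := PySem.Dict.ofList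
  [("MADRID", 4), ("BARCELONA", 4),
   ("VALENCIA", 3), ("ALICANTE", 3), ("MALAGA", 3), ("SEVILLA", 3), ("BIZKAIA", 3),
   ("MURCIA", 2), ("ZARAGOZA", 2), ("PONTEVEDRA", 2), ("ASTURIAS", 2), ("CORUÑA", 2),
   ("BALEARS", 2), ("PALMAS", 2), ("TENERIFE", 2)]

def get_location_score_alt (registry : String) (municipality : String) : Int :=
  let text := PySem.Str.upper (registry ++ " " ++ municipality)
  pvTable.items.foldl
    (fun best kv => if PySem.Str.isIn kv.1 text && decide (best < kv.2) then kv.2 else best) 1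

-- ===== PRECONDITION & SPEC =====
def Spec_get_location_score (registry : String) (municipality : String) (out : Int) : Prop := out = get_location_score_alt registry municipality
instance (registry : String) (municipality : String) (out : Int) : Decidable (Spec_get_location_score registry municipality out) := by unfold Spec_get_location_score; infer_instance

-- ===== CLAIM (what is proved, stated in full; the proofs are below) =====
def Claim_equal_get_location_score : Prop := ∀ (registry : String) (municipality : String), Dom_get_location_score registry municipality → Spec_get_location_score registry municipality (get_location_score registry municipality)

-- ===== LEMMAS AND PROOFS =====

-- If the running best already dominates every score in the tail, the fold leaves it unchanged.
theorem pvFold_stop (p : String → Bool) (b : Int) (l : List (String × Int))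
    (h : ∀ kv ∈ l, ¬ b < kv.2) :
    l.foldl (fun best kv => if p kv.1 && decide (best < kv.2) then kv.2 else best) b = b := by
  induction l with
  | nil => rfl
  | cons kv t ih =>
    simp only [List.foldl_cons, decide_eq_false (h kv (by simp)), Bool.and_false,
      Bool.false_eq_true, if_false]
    exact ih (fun x hx => h x (by simp [hx]))

-- Folding one tier of equal scores s over a best b < s yields s iff some keyword matches.
theorem pvFold_group (p : String → Bool) (s : Int) (b : Int) (hb : b < s)
    (l : List (String × Int)) (hl : ∀ kv ∈ l, kv.2 = s) :
    l.foldl (fun best kv => if p kv.1 && decide (best < kv.2) then kv.2 else best) b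
      = if l.any (fun kv => p kv.1) then s else b := by
  induction l with
  | nil => rfl
  | cons kv t ih =>
    have h2 : kv.2 = s := hl kv (by simp)
    by_cases hp : p kv.1 = true
    · simp only [List.foldl_cons, hp, h2, decide_eq_true hb, Bool.true_and, if_true,
        List.any_cons, Bool.true_or]
      exact pvFold_stop p s t (fun x hx => by rw [hl x (by simp [hx])]; exact lt_irrefl s)
    · simp only [List.foldl_cons, Bool.eq_false_iff.mpr hp, Bool.false_and,
        Bool.false_eq_true, if_false, List.any_cons, Bool.false_or]
      exact ih (fun x hx => hl x (by simp [hx]))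

-- Key lemma: the cascade equals the best-score fold, for any match predicate p.
theorem pvKey (p : String → Bool) :
    (if p "MADRID" || p "BARCELONA" then (4 : Int)
     else if ["VALENCIA", "ALICANTE", "MALAGA", "SEVILLA", "BIZKAIA"].any p then 3
     else if ["MURCIA", "ZARAGOZA", "PONTEVEDRA", "ASTURIAS", "CORUÑA", "BALEARS", "PALMAS", "TENERIFE"].any p then 2
     else 1)
    = ([("MADRID", (4 : Int)), ("BARCELONA", 4),
        ("VALENCIA", 3), ("ALICANTE", 3), ("MALAGA", 3), ("SEVILLA", 3), ("BIZKAIA", 3),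
        ("MURCIA", 2), ("ZARAGOZA", 2), ("PONTEVEDRA", 2), ("ASTURIAS", 2), ("CORUÑA", 2),
        ("BALEARS", 2), ("PALMAS", 2), ("TENERIFE", 2)].foldl
          (fun best kv => if p kv.1 && decide (best < kv.2) then kv.2 else best) 1) := by
  rw [show ([("MADRID", (4 : Int)), ("BARCELONA", 4),
        ("VALENCIA", 3), ("ALICANTE", 3), ("MALAGA", 3), ("SEVILLA", 3), ("BIZKAIA", 3),
        ("MURCIA", 2), ("ZARAGOZA", 2), ("PONTEVEDRA", 2), ("ASTURIAS", 2), ("CORUÑA", 2),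
        ("BALEARS", 2), ("PALMAS", 2), ("TENERIFE", 2)])
      = [("MADRID", (4 : Int)), ("BARCELONA", 4)]
        ++ ([("VALENCIA", (3 : Int)), ("ALICANTE", 3), ("MALAGA", 3), ("SEVILLA", 3), ("BIZKAIA", 3)]
        ++ [("MURCIA", (2 : Int)), ("ZARAGOZA", 2), ("PONTEVEDRA", 2), ("ASTURIAS", 2), ("CORUÑA", 2),
            ("BALEARS", 2), ("PALMAS", 2), ("TENERIFE", 2)]) from rfl,
    List.foldl_append, List.foldl_append,
    pvFold_group p 4 1 (by norm_num) _ (by simp)]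
  cases c4 : ([("MADRID", (4 : Int)), ("BARCELONA", 4)].any fun kv => p kv.1) with
  | true =>
    have cM : (p "MADRID" || p "BARCELONA") = true := by simpa using c4
    simp only [cM, if_true]
    rw [pvFold_stop p 4 [("VALENCIA", (3 : Int)), ("ALICANTE", 3), ("MALAGA", 3), ("SEVILLA", 3), ("BIZKAIA", 3)] (by decide), pvFold_stop p 4 [("MURCIA", (2 : Int)), ("ZARAGOZA", 2), ("PONTEVEDRA", 2), ("ASTURIAS", 2), ("CORUÑA", 2), ("BALEARS", 2), ("PALMAS", 2), ("TENERIFE", 2)] (by decide)]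
  | false =>
    have cM : (p "MADRID" || p "BARCELONA") = false := by simpa using c4
    simp only [cM, Bool.false_eq_true, if_false]
    rw [pvFold_group p 3 1 (by decide) [("VALENCIA", (3 : Int)), ("ALICANTE", 3), ("MALAGA", 3), ("SEVILLA", 3), ("BIZKAIA", 3)] (by decide)]
    cases c3 : ([("VALENCIA", (3 : Int)), ("ALICANTE", 3), ("MALAGA", 3), ("SEVILLA", 3), ("BIZKAIA", 3)].any fun kv => p kv.1) with
    | true =>
      have cV : (["VALENCIA", "ALICANTE", "MALAGA", "SEVILLA", "BIZKAIA"].any p) = true := by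
        simpa using c3
      simp only [cV, if_true]
      rw [pvFold_stop p 3 [("MURCIA", (2 : Int)), ("ZARAGOZA", 2), ("PONTEVEDRA", 2), ("ASTURIAS", 2), ("CORUÑA", 2), ("BALEARS", 2), ("PALMAS", 2), ("TENERIFE", 2)] (by decide)]
    | false =>
      have cV : (["VALENCIA", "ALICANTE", "MALAGA", "SEVILLA", "BIZKAIA"].any p) = false := by
        simpa using c3
      simp only [cV, Bool.false_eq_true, if_false]
      rw [pvFold_group p 2 1 (by decide) [("MURCIA", (2 : Int)), ("ZARAGOZA", 2), ("PONTEVEDRA", 2), ("ASTURIAS", 2), ("CORUÑA", 2), ("BALEARS", 2), ("PALMAS", 2), ("TENERIFE", 2)] (by decide)]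
      simp

-- ===== VERDICT (by name: the statement is the Claim_ definition above) =====
theorem get_location_score_spec : Claim_equal_get_location_score := by
  intro registry municipality _
  unfold Spec_get_location_score get_location_score get_location_score_alt pvTable
  exact pvKey (fun k => PySem.Str.isIn k (PySem.Str.upper (registry ++ " " ++ municipality)))
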